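-- pv_equiv track=rewrite | github.com/persona613/leetcode_practices | 830. Positions of Large Groups.py | largeGroupPositions
-- ===== SOURCE A (Python) =====
-- from typing import List
--
-- def largeGroupPositions(s: str) -> List[List[int]]:
--     res, cnt = [], 1
--     for i in range(1, len(s)):
--         if s[i] == s[i-1]:
--             cnt += 1
--         elif cnt < 3:
--             cnt = 1
--         else:
--             res.append([i-cnt, i-1])
--             cnt = 1
--     if cnt >= 3:
--         res.append([i+1-cnt, i])
--     return res
-- ===== SOURCE B (Python) =====
-- from typing import List
--
-- def largeGroupPositions(s: str) -> List[List[int]]: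
--     # Stage 1: indices i where a run ends because s[i] != s[i+1].
--     breaks = [i for i, (x, y) in enumerate(zip(s, s[1:])) if x != y]
--     # Stage 2: run-end edges with sentinels; each adjacent pair (lo, hi) is a run s[lo+1..hi].
--     edges = [-1] + breaks + [len(s) - 1]
--     return [[lo + 1, hi] for lo, hi in zip(edges, edges[1:]) if hi - lo >= 3]
-- ===== Notes on version B (the rewrite author's own statement) =====
-- stated objective: alternative
-- what changed: Replaced A's single-pass run counter with post-loop flush by two staged comprehensions: first collect all break indices where adjacent characters differ, then pairwise-scan the sentinel-framed edge list emitting [lo+1, hi] for gaps >= 3 (no counter, no run state, no final flush).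
import Mathlib
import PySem

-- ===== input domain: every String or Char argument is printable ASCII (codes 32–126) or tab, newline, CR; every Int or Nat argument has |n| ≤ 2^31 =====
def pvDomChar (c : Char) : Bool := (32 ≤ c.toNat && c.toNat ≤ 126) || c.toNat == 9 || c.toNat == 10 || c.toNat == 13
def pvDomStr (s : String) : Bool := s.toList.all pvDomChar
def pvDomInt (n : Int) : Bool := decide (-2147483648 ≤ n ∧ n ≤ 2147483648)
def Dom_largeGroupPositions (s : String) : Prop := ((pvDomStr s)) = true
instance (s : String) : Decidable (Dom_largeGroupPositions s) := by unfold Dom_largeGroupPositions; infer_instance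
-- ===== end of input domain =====

-- B replaces A's single-pass counter with two staged comprehensions (collect break indices,
-- then pairwise-scan the edge list); same O(n) cost, different decomposition.
-- ===== PORT A =====
-- loop over i = 1..n-1 comparing s[i] with s[i-1]; state: prev = s[i-1], i, cnt, res;
-- at the end ([] case) the Python flush 'if cnt >= 3: res.append([i+1-cnt, i])' with i = n-1.
def pvLoopA : List Char → Char → Int → Int → List (List Int) → List (List Int)
  | [], _, i, cnt, res => if cnt ≥ 3 then res ++ [[i - cnt, i - 1]] else res
  | c :: rest, prev, i, cnt, res =>
    if c == prev then pvLoopA rest c (i + 1) (cnt + 1) res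
    else if cnt < 3 then pvLoopA rest c (i + 1) 1 res
    else pvLoopA rest c (i + 1) 1 (res ++ [[i - cnt, i - 1]])

def largeGroupPositions (s : String) : List (List Int) :=
  match s.toList with
  | [] => []
  | c :: rest => pvLoopA rest c 1 1 []

-- ===== PORT B =====
-- Source B: breaks = [i for i, (x, y) in enumerate(zip(s, s[1:])) if x != y];
--       edges  = [-1] + breaks + [len(s) - 1];
--       return [[lo + 1, hi] for lo, hi in zip(edges, edges[1:]) if hi - lo >= 3]
def largeGroupPositions_alt (s : String) : List (List Int) :=
  let l := s.toList
  let breaks : List Int :=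
    ((PySem.List.enumerate (l.zip (PySem.List.slice l (some 1) none)) 0).filter
        (fun p => !(p.2.1 == p.2.2))).map (·.1)
  let edges : List Int := [-1] ++ breaks ++ [(l.length : Int) - 1]
  ((edges.zip (PySem.List.slice edges (some 1) none)).filter
      (fun p => decide (p.2 - p.1 ≥ 3))).map (fun p => [p.1 + 1, p.2])

-- ===== PRECONDITION & SPEC =====
def Spec_largeGroupPositions (s : String) (out : List (List Int)) : Prop := out = largeGroupPositions_alt s
instance (s : String) (out : List (List Int)) : Decidable (Spec_largeGroupPositions s out) := by unfold Spec_largeGroupPositions; infer_instance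

-- ===== CLAIM (what is proved, stated in full; the proofs are below) =====
def Claim_equal_largeGroupPositions : Prop := ∀ (s : String), Dom_largeGroupPositions s → Spec_largeGroupPositions s (largeGroupPositions s)

-- ===== LEMMAS AND PROOFS =====

-- break indices of the remaining input: brk l prev i emits i-1 whenever head l ≠ prev, ascending.
def pvBrk : List Char → Char → Int → List Int
  | [], _, _ => []
  | c :: rest, prev, i => (if c == prev then [] else [i - 1]) ++ pvBrk rest c (i + 1)

-- adjacent-pair scan of the edge list
def pvPairs : List Int → List (List Int)
  | a :: b :: t => (if b - a ≥ 3 then [[a + 1, b]] else []) ++ pvPairs (b :: t)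
  | _ => []

theorem pvPairs_eq_zip (edges : List Int) :
    ((edges.zip edges.tail).filter (fun p => decide (p.2 - p.1 ≥ 3))).map
        (fun p => [p.1 + 1, p.2]) = pvPairs edges := by
  match edges with
  | [] => simp [pvPairs]
  | [a] => simp [pvPairs]
  | a :: b :: t =>
    have ih := pvPairs_eq_zip (b :: t)
    simp only [List.zip_cons_cons, List.filter_cons, List.tail] at *
    by_cases h : b - a ≥ 3 <;> simp [pvPairs, h, ih]

theorem pvBrk_eq_zip (l : List Char) : ∀ (prev : Char) (i : Int),
    ((PySem.List.enumerate ((prev :: l).zip l) (i - 1)).filter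
        (fun p => !(p.2.1 == p.2.2))).map (·.1) = pvBrk l prev i := by
  induction l with
  | nil => intro prev i; simp [pvBrk]
  | cons c rest ih =>
    intro prev i
    have hz : (prev :: c :: rest).zip (c :: rest) = (prev, c) :: ((c :: rest).zip rest) := by
      simp
    rw [hz, PySem.List.enumerate_cons, List.filter_cons]
    have ihc := ih c (i + 1)
    rw [show (i + 1 - 1 : Int) = i from by ring] at ihc
    by_cases h : c = prev
    · subst h
      simp [pvBrk, ihc]
    · have hb : (c == prev) = false := by simp [h]
      have hb' : (prev == c) = false := by simp [Ne.symm h]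
      simp [pvBrk, ihc, hb, hb']

-- Invariant of A's loop: with a current run of length cnt ending just before index i,
-- the loop result is res ++ the pairwise scan of sentinel :: remaining breaks :: final edge.
theorem pvLoopA_eq (l : List Char) : ∀ (prev : Char) (i cnt : Int) (res : List (List Int)),
    1 ≤ cnt →
    pvLoopA l prev i cnt res =
      res ++ pvPairs ((i - 1 - cnt) :: (pvBrk l prev i ++ [i - 1 + l.length])) := by
  induction l with
  | nil =>
    intro prev i cnt res h
    simp only [pvLoopA, pvBrk, List.nil_append, List.length_nil, pvPairs]
    rw [show (i - 1 + ((0 : Nat) : Int)) = i - 1 from by push_cast; ring,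
        show (i - 1 - (i - 1 - cnt) : Int) = cnt from by ring,
        show (i - 1 - cnt + 1 : Int) = i - cnt from by ring]
    split_ifs <;> simp
  | cons c rest ih =>
    intro prev i cnt res h
    by_cases hc : (c == prev) = true
    · simp only [pvLoopA, hc, if_pos]
      rw [ih c (i + 1) (cnt + 1) res (by omega)]
      simp only [pvBrk, hc, if_pos, List.nil_append, List.length_cons]
      rw [show (i + 1 - 1 - (cnt + 1) : Int) = i - 1 - cnt from by ring]
      push_cast
      ring_nf
    · have hb : (c == prev) = false := by simpa using hc
      simp only [pvBrk, hb, Bool.false_eq_true, if_false, List.length_cons]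
      push_cast
      simp only [List.cons_append]
      have hsp : ∀ (t : List Int), pvPairs ((i - 1 - cnt) :: (i - 1) :: t) =
          (if cnt ≥ 3 then [[i - cnt, i - 1]] else []) ++ pvPairs ((i - 1) :: t) := by
        intro t
        have hu : pvPairs ((i - 1 - cnt) :: (i - 1) :: t) =
            (if (i - 1) - (i - 1 - cnt) ≥ 3 then [[i - 1 - cnt + 1, i - 1]] else []) ++
              pvPairs ((i - 1) :: t) := by simp [pvPairs]
        rw [hu, show (i - 1 - (i - 1 - cnt) : Int) = cnt from by ring,
            show (i - 1 - cnt + 1 : Int) = i - cnt from by ring]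
      rw [show (i - 1 + ((rest.length : Int) + 1)) = i + 1 - 1 + (rest.length : Int) from by ring,
          hsp]
      by_cases h5 : cnt < 3
      · simp only [pvLoopA, hb, Bool.false_eq_true, if_false, if_pos h5]
        rw [ih c (i + 1) 1 res (by norm_num)]
        rw [show (i + 1 - 1 - 1 : Int) = i - 1 from by ring]
        rw [if_neg (by omega)]
        simp
      · simp only [pvLoopA, hb, Bool.false_eq_true, if_false, if_neg h5]
        rw [ih c (i + 1) 1 (res ++ [[i - cnt, i - 1]]) (by norm_num)]
        rw [show (i + 1 - 1 - 1 : Int) = i - 1 from by ring]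
        rw [if_pos (by omega)]
        simp

-- ===== VERDICT (by name: the statement is the Claim_ definition above) =====
theorem largeGroupPositions_spec : Claim_equal_largeGroupPositions := by
  intro s _
  unfold Spec_largeGroupPositions largeGroupPositions largeGroupPositions_alt
  simp only [PySem.List.slice_from_one]
  cases hl : s.toList with
  | nil => simp
  | cons c rest =>
    show pvLoopA rest c 1 1 [] = _
    rw [pvLoopA_eq rest c 1 1 [] (by norm_num)]
    simp only [List.tail_cons, List.nil_append]
    have hbrk : ((PySem.List.enumerate ((c :: rest).zip rest) 0).filter
        (fun p => !(p.2.1 == p.2.2))).map (·.1) = pvBrk rest c 1 := by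
      have h := pvBrk_eq_zip rest c 1
      rw [show ((1 : Int) - 1) = 0 from by ring] at h
      exact h
    rw [hbrk, pvPairs_eq_zip]
    norm_num
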